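-- pv_equiv track=rewrite | github.com/magdielpatricio2015-png/Futebol | app.py | _event_minute_from_status
-- ===== SOURCE A (Python) =====
-- def _event_minute_from_status(status):
--     """Tenta extrair o minuto atual a partir de diferentes formatos de status."""
--     if not isinstance(status, dict):
--         return 0
--     for key in ("displayClock", "clock"):
--         raw = status.get(key)
--         if raw is None:
--             continue
--         text = str(raw)
--         digits = ""
--         for ch in text:
--             if ch.isdigit():
--                 digits += ch
--             elif digits:
--                 break
--         if digits:
--             return max(0, min(130, int(digits)))
--     desc = str(status.get("description") or status.get("shortDetail") or "")
--     digits = ""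
--     for ch in desc:
--         if ch.isdigit():
--             digits += ch
--         elif digits:
--             break
--     if digits:
--         return max(0, min(130, int(digits)))
--     return 0
-- ===== SOURCE B (Python) =====
-- def _first_digit_run(text):
--     i = 0
--     while i < len(text) and not text[i].isdigit():
--         i += 1
--     j = i
--     while j < len(text) and text[j].isdigit():
--         j += 1
--     return text[i:j]
--
--
-- def _event_minute_from_status(status):
--     if not isinstance(status, dict):
--         return 0
--     candidates = []
--     for key in ("displayClock", "clock"):
--         raw = status.get(key)
--         if raw is not None:
--             candidates.append(str(raw))
--     candidates.append(str(status.get("description") or status.get("shortDetail") or ""))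
--     for text in candidates:
--         run = _first_digit_run(text)
--         if run:
--             return max(0, min(130, int(run)))
--     return 0
-- ===== Notes on version B (the rewrite author's own statement) =====
-- stated objective: simpler
-- what changed: Replaces A's three inlined accumulate-and-break digit loops with one pass over an ordered candidate list plus a single index-based first-digit-run helper.
import Mathlib
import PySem

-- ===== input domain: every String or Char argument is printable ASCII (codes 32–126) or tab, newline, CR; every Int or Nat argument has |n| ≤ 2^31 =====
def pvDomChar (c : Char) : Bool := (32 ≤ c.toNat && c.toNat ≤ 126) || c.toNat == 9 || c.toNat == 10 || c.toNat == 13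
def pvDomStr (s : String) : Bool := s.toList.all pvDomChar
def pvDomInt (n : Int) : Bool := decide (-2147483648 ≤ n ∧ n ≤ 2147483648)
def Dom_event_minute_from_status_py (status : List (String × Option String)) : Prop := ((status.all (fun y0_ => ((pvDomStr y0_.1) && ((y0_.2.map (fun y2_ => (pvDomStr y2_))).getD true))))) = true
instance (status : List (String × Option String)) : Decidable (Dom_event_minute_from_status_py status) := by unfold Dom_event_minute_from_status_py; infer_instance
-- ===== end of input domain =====

-- B unifies A's three inlined accumulate-and-break digit loops into one pass over an
-- ordered candidate list with a single first-digit-run helper (objective: simpler).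
-- Shared by both ports: status.get(key) for a dict[str, Optional[str]] — first match
-- in the association list, flattening the stored Optional (missing key and stored None
-- both give none, exactly Python's 'raw is None' test).
def pvGet (status : List (String × Option String)) (key : String) : Option String :=
  ((status.find? (fun p => p.1 == key)).map Prod.snd).join

-- Shared: str(status.get("description") or status.get("shortDetail") or ""),
-- the identical expression in both Pythons ('or' = first truthy, Some s truthy iff s ≠ "").
def pvDesc (status : List (String × Option String)) : String :=
  match pvGet status "description" with
  | some s => if s = "" then
      (match pvGet status "shortDetail" with
       | some t => if t = "" then "" else t
       | none => "")
    else s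
  | none =>
      match pvGet status "shortDetail" with
      | some t => if t = "" then "" else t
      | none => ""

-- ===== PORT A =====
-- A's inner loop: digits accumulated; a non-digit after a non-empty run breaks.
def pvScanA : List Char → List Char → List Char
  | [], digits => digits
  | c :: rest, digits =>
      if PySem.Chars.isdigit c then pvScanA rest (digits ++ [c])
      else if digits = [] then pvScanA rest digits
      else digits

-- one iteration of A's 'for key in (…)' body: some v = 'return v', none = fall through
def pvTryKeyA (status : List (String × Option String)) (key : String) : Option Int :=
  match pvGet status key with
  | none => none
  | some text =>
      let digits := pvScanA text.toList []
      if digits = [] then none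
      else some (max 0 (min 130 ((PySem.Int.ofChars? digits).getD 0)))

def event_minute_from_status_py (status : List (String × Option String)) : Int :=
  match pvTryKeyA status "displayClock" with
  | some v => v
  | none =>
    match pvTryKeyA status "clock" with
    | some v => v
    | none =>
        let digits := pvScanA (pvDesc status).toList []
        if digits = [] then 0
        else max 0 (min 130 ((PySem.Int.ofChars? digits).getD 0))

-- ===== PORT B =====
-- _first_digit_run: skip non-digits, then take the maximal digit run (two index loops)
def pvFirstRun (cs : List Char) : List Char :=
  (cs.dropWhile (fun c => !PySem.Chars.isdigit c)).takeWhile PySem.Chars.isdigit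

-- 'for text in candidates: …' loop of B
def pvPickB : List (List Char) → Int
  | [] => 0
  | t :: rest =>
      let run := pvFirstRun t
      if run = [] then pvPickB rest
      else max 0 (min 130 ((PySem.Int.ofChars? run).getD 0))

def event_minute_from_status_py_alt (status : List (String × Option String)) : Int :=
  let candidates :=
    (["displayClock", "clock"].filterMap (fun k => pvGet status k)) ++ [pvDesc status]
  pvPickB (candidates.map String.toList)

-- ===== PRECONDITION & SPEC =====
def Spec_event_minute_from_status_py (status : List (String × Option String)) (out : Int) : Prop := out = event_minute_from_status_py_alt status
instance (status : List (String × Option String)) (out : Int) : Decidable (Spec_event_minute_from_status_py status out) := by unfold Spec_event_minute_from_status_py; infer_instance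

-- ===== CLAIM (what is proved, stated in full; the proofs are below) =====
def Claim_equal_event_minute_from_status_py : Prop := ∀ (status : List (String × Option String)), Dom_event_minute_from_status_py status → Spec_event_minute_from_status_py status (event_minute_from_status_py status)

-- ===== LEMMAS AND PROOFS =====
theorem pvScanA_ne (cs : List Char) (digits : List Char) (h : digits ≠ []) :
    pvScanA cs digits = digits ++ cs.takeWhile PySem.Chars.isdigit := by
  induction cs generalizing digits with
  | nil => simp [pvScanA]
  | cons c rest ih =>
    by_cases hc : PySem.Chars.isdigit c
    · simp [pvScanA, hc, ih (digits ++ [c]) (by simp)]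
    · simp [pvScanA, hc, h]

theorem pvScanA_eq_firstRun (cs : List Char) : pvScanA cs [] = pvFirstRun cs := by
  induction cs with
  | nil => simp [pvScanA, pvFirstRun]
  | cons c rest ih =>
    by_cases hc : PySem.Chars.isdigit c
    · simp [pvScanA, pvFirstRun, hc, pvScanA_ne rest [c] (by simp)]
    · simpa [pvScanA, pvFirstRun, hc, List.dropWhile_cons] using ih

theorem pvTryKeyA_eq (status : List (String × Option String)) (key : String) :
    pvTryKeyA status key =
      (pvGet status key).bind (fun text =>
        let run := pvFirstRun text.toList
        if run = [] then none
        else some (max 0 (min 130 ((PySem.Int.ofChars? run).getD 0)))) := by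
  cases h : pvGet status key with
  | none => simp [pvTryKeyA, h]
  | some text => simp [pvTryKeyA, h, pvScanA_eq_firstRun]

-- ===== VERDICT (by name: the statement is the Claim_ definition above) =====
theorem event_minute_from_status_py_spec : Claim_equal_event_minute_from_status_py := by
  intro status _
  unfold Spec_event_minute_from_status_py
  unfold event_minute_from_status_py event_minute_from_status_py_alt
  rw [pvTryKeyA_eq, pvTryKeyA_eq]
  cases h1 : pvGet status "displayClock" with
  | none =>
    cases h2 : pvGet status "clock" with
    | none => simp [h1, h2, pvPickB, pvScanA_eq_firstRun]
    | some t2 =>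
      simp only [h1, h2, Option.bind_some, List.filterMap, List.map,
        List.cons_append, List.nil_append, pvPickB]
      split_ifs <;> simp_all [pvScanA_eq_firstRun]
  | some t1 =>
    cases h2 : pvGet status "clock" with
    | none =>
      simp only [h1, h2, Option.bind_some, List.filterMap, List.map,
        List.cons_append, List.nil_append, pvPickB]
      split_ifs <;> simp_all [pvScanA_eq_firstRun]
    | some t2 =>
      simp only [h1, h2, Option.bind_some, List.filterMap, List.map,
        List.cons_append, List.nil_append, pvPickB]
      split_ifs <;> simp_all [pvScanA_eq_firstRun]
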